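-- pv_equiv track=rewrite | github.com/mquintus/l33tcode-reload | Daily_Challenge/1814_Count_Nice_Pairs_in_an_Array.py | countNicePairs
-- ===== SOURCE A (Python) =====
-- from typing import List
--
-- def countNicePairs(nums: List[int]) -> int:
--     hashmap = {}
--
--     MOD = 10**9 + 7
--
--     def reverse_num(num):
--         return int(f"{num}"[::-1])
--
--     for i,a in enumerate(nums):
--         identifier = a - reverse_num(a)
--         if identifier not in hashmap:
--             hashmap[identifier] = 0
--         hashmap[identifier] += 1
--
--     global_count = 0
--     for count in hashmap.values():
--         if count == 1:
--             continue
--         combinations = (count * (count-1)) // 2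
--         global_count += combinations
--
--     return global_count % MOD
-- ===== SOURCE B (Python) =====
-- def countNicePairs(nums):
--     MOD = 10**9 + 7
--
--     def reverse_num(num):
--         return int(f"{num}"[::-1])
--
--     seen = {}
--     total = 0
--     for a in nums:
--         identifier = a - reverse_num(a)
--         c = seen.get(identifier, 0)
--         total += c
--         seen[identifier] = c + 1
--     return total % MOD
-- ===== Notes on version B (the rewrite author's own statement) =====
-- stated objective: alternative
-- what changed: Single pass with a running total that adds, for each element, the number of previously seen elements with the same a-rev(a) identifier, replacing A's two-phase build-full-counter-then-sum-count*(count-1)//2 scheme.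
import Mathlib
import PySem

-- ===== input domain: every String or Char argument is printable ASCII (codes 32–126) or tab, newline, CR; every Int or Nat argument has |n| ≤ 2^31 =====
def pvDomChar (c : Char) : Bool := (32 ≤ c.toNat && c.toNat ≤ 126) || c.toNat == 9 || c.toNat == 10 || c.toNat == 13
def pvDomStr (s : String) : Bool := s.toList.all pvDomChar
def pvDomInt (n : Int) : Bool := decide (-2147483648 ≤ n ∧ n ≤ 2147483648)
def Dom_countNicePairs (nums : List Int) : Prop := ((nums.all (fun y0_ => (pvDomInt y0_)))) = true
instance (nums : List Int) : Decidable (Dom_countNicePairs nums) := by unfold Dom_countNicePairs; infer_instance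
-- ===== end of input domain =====

-- B does the same counting in ONE pass (running total of earlier equal identifiers) instead of
-- A's two phases (build the full counter, then sum count*(count-1)//2); same cost class.

-- ===== PORT A =====
-- reverse_num(num) = int(f"{num}"[::-1]); none (ValueError, e.g. negative num) is outside Pre_, getD 0 is never reached there
def pvRev (n : Int) : Int := (PySem.Int.ofChars? (PySem.Int.toChars n).reverse).getD 0

def countNicePairs (nums : List Int) : Int :=
  let hashmap : PySem.Dict Int Int :=
    (PySem.List.enumerate nums).foldl (fun d p =>
      let identifier := p.2 - pvRev p.2
      let d := if d.contains identifier then d else d.insert identifier 0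
      d.insert identifier (d.getD identifier 0 + 1)) PySem.Dict.empty
  let globalCount : Int :=
    hashmap.values.foldl (fun acc count =>
      if count = 1 then acc
      else acc + PySem.Int.floordiv (count * (count - 1)) 2) 0
  PySem.Int.mod globalCount (10 ^ 9 + 7)

-- ===== PORT B =====
def countNicePairs_alt (nums : List Int) : Int :=
  let st : PySem.Dict Int Int × Int :=
    nums.foldl (fun st a =>
      let identifier := a - pvRev a
      let c := st.1.getD identifier 0
      (st.1.insert identifier (c + 1), st.2 + c)) (PySem.Dict.empty, 0)
  PySem.Int.mod st.2 (10 ^ 9 + 7)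

-- ===== PRECONDITION & SPEC =====
-- Pre_ excludes lists with a negative entry: there reverse_num feeds int() a string ending in '-' and BOTH programs raise ValueError.
def Pre_countNicePairs (nums : List Int) : Prop := ∀ a ∈ nums, 0 ≤ a
instance (nums : List Int) : Decidable (Pre_countNicePairs nums) := by unfold Pre_countNicePairs; infer_instance
def pvWitness_countNicePairs : List Int := [0, 12, 21, 12]

def Spec_countNicePairs (nums : List Int) (out : Int) : Prop := out = countNicePairs_alt nums
instance (nums : List Int) (out : Int) : Decidable (Spec_countNicePairs nums out) := by unfold Spec_countNicePairs; infer_instance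

-- ===== CLAIM (what is proved, stated in full; the proofs are below) =====
def Claim_equal_countNicePairs : Prop := ∀ (nums : List Int), Dom_countNicePairs nums → Pre_countNicePairs nums → Spec_countNicePairs nums (countNicePairs nums)

-- ===== LEMMAS AND PROOFS =====

-- C(c,2) as both programs' arithmetic produces it
def pvComb (c : Int) : Int := PySem.Int.floordiv (c * (c - 1)) 2

lemma pvComb_succ (c : Int) : pvComb (c + 1) = pvComb c + c := by
  unfold pvComb
  rw [PySem.Int.floordiv_eq_ediv_of_pos (by norm_num), PySem.Int.floordiv_eq_ediv_of_pos (by norm_num)]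
  obtain ⟨m, hm⟩ := Int.even_mul_succ_self (c - 1)
  have hm' : c * (c - 1) = 2 * m := by nlinarith [hm]
  have h2 : (c + 1) * (c + 1 - 1) = 2 * m + 2 * c := by nlinarith [hm']
  rw [h2, hm']
  omega

-- sum of pvComb over a dict's items
def pvSum (l : List (Int × Int)) : Int := (l.map (fun p => pvComb p.2)).sum

lemma pvSum_append (l₁ l₂ : List (Int × Int)) : pvSum (l₁ ++ l₂) = pvSum l₁ + pvSum l₂ := by
  simp [pvSum]

lemma pvSum_update (l : List (Int × Int)) (k c v : Int)
    (hn : (l.map (·.1)).Nodup) (hmem : (k, c) ∈ l) :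
    pvSum (l.map (fun p => if p.1 == k then (k, v) else p)) = pvSum l - pvComb c + pvComb v := by
  induction l with
  | nil => simp at hmem
  | cons p t ih =>
    simp only [List.map_cons, List.nodup_cons] at hn
    by_cases hk : p.1 = k
    · have hpt : (k, c) ∉ t := by
        intro h
        have hkm : k ∈ t.map (·.1) := List.mem_map.mpr ⟨(k, c), h, rfl⟩
        rw [hk] at hn
        exact hn.1 hkm
      have hp : p = (k, c) := by
        rcases List.mem_cons.mp hmem with h | h
        · exact h.symm
        · exact absurd h hpt
      subst hp
      have htid : t.map (fun p => if p.1 == k then ((k : Int), v) else p) = t := by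
        rw [List.map_congr_left (g := id), List.map_id]
        intro q hq
        have hqk : q.1 ≠ k := by
          intro he
          exact hn.1 (List.mem_map.mpr ⟨q, hq, he⟩)
        simp [hqk]
      simp only [List.map_cons, beq_self_eq_true, if_pos, htid]
      simp only [pvSum, List.map_cons, List.sum_cons]
      ring
    · have hmem' : (k, c) ∈ t := by
        rcases List.mem_cons.mp hmem with h | h
        · exact absurd (by rw [← h]) hk
        · exact h
      have hrec := ih hn.2 hmem'
      simp only [List.map_cons, beq_iff_eq, if_neg hk]
      simp only [pvSum, List.map_cons, List.sum_cons, beq_iff_eq] at hrec ⊢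
      omega

-- A's per-element update, rewritten as B's single insert (keys stay Nodup along the fold)
lemma stepA_eq (d : PySem.Dict Int Int) (k : Int) :
    (let d' := if d.contains k then d else d.insert k 0;
     d'.insert k (d'.getD k 0 + 1)) = d.insert k (d.getD k 0 + 1) := by
  by_cases h : d.contains k = true
  · simp [h]
  · have hf : d.contains k = false := by simpa using h
    simp only [hf, Bool.false_eq_true, if_false]
    rw [PySem.Dict.getD_insert_self, PySem.Dict.getD_of_not_contains d 0 hf]
    apply PySem.Dict.ext
    rw [PySem.Dict.items_insert_of_contains _ _ (by simp),
        PySem.Dict.items_insert_of_not_contains _ _ hf,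
        PySem.Dict.items_insert_of_not_contains _ _ hf]
    rw [List.map_append]
    congr 1
    · rw [List.map_congr_left (g := id), List.map_id]
      intro q hq
      have hqk : q.1 ≠ k := by
        intro he
        have hkm : k ∈ d.keys := by
          have : q.1 ∈ d.items.map (·.1) := List.mem_map.mpr ⟨q, hq, rfl⟩
          rw [he] at this
          simpa [PySem.Dict.keys] using this
        have := (PySem.Dict.contains_iff_mem_keys d k).mpr hkm
        rw [hf] at this
        exact absurd this (by simp)
      simp [hqk]
    · simp

-- effect of one counting insert on pvSum
lemma pvSum_insert (d : PySem.Dict Int Int) (k : Int) (hn : d.keys.Nodup) :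
    pvSum (d.insert k (d.getD k 0 + 1)).items = pvSum d.items + d.getD k 0 := by
  by_cases h : d.contains k = true
  · have hg : (d.get? k).isSome := by rw [← PySem.Dict.contains_eq_isSome_get?]; exact h
    obtain ⟨c, hc⟩ := Option.isSome_iff_exists.mp hg
    have hmem : (k, c) ∈ d.items := PySem.Dict.mem_items_of_get?_eq_some d hc
    have hgd : d.getD k 0 = c := PySem.Dict.getD_of_get?_eq_some d 0 hc
    rw [PySem.Dict.items_insert_of_contains _ _ h]
    have hnk : (d.items.map (·.1)).Nodup := by simpa [PySem.Dict.keys] using hn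
    rw [pvSum_update d.items k c _ hnk hmem, hgd, pvComb_succ]
    ring
  · have hf : d.contains k = false := by simpa using h
    rw [PySem.Dict.items_insert_of_not_contains _ _ hf,
        PySem.Dict.getD_of_not_contains d 0 hf, pvSum_append]
    simp [pvSum, pvComb, PySem.Int.floordiv]

def stepB (st : PySem.Dict Int Int × Int) (a : Int) : PySem.Dict Int Int × Int :=
  let identifier := a - pvRev a
  let c := st.1.getD identifier 0
  (st.1.insert identifier (c + 1), st.2 + c)

-- main invariant: B's fold carries (A's dict, pvSum of it)
lemma inv (xs : List Int) : ∀ (d : PySem.Dict Int Int), d.keys.Nodup →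
    xs.foldl stepB (d, pvSum d.items)
      = (xs.foldl (fun d a => d.insert (a - pvRev a) (d.getD (a - pvRev a) 0 + 1)) d,
         pvSum (xs.foldl (fun d a => d.insert (a - pvRev a) (d.getD (a - pvRev a) 0 + 1)) d).items) := by
  induction xs with
  | nil => intro d hn; simp
  | cons a t ih =>
    intro d hn
    have hn' : (d.insert (a - pvRev a) (d.getD (a - pvRev a) 0 + 1)).keys.Nodup :=
      PySem.Dict.nodup_keys_insert _ _ _ hn
    simp only [List.foldl_cons]
    have h1 : stepB (d, pvSum d.items) a
        = (d.insert (a - pvRev a) (d.getD (a - pvRev a) 0 + 1),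
           pvSum (d.insert (a - pvRev a) (d.getD (a - pvRev a) 0 + 1)).items) := by
      simp [stepB, pvSum_insert d _ hn]
    rw [h1, ih _ hn']

-- A's dict-building fold (two-step insert, over enumerate) equals B's single-insert fold over nums
lemma foldA_eq (nums : List Int) (d : PySem.Dict Int Int) :
    nums.foldl (fun d a =>
        let identifier := a - pvRev a
        let d := if d.contains identifier then d else d.insert identifier 0
        d.insert identifier (d.getD identifier 0 + 1)) d
      = nums.foldl (fun d a => d.insert (a - pvRev a) (d.getD (a - pvRev a) 0 + 1)) d := by
  induction nums generalizing d with
  | nil => rfl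
  | cons a t ih =>
    simp only [List.foldl_cons]
    rw [stepA_eq d (a - pvRev a)]
    exact ih _

-- ===== VERDICT (by name: the statement is the Claim_ definition above) =====
theorem countNicePairs_spec : Claim_equal_countNicePairs := by
  intro nums _ _
  unfold Spec_countNicePairs countNicePairs countNicePairs_alt
  simp only []
  -- name the single-insert fold
  set F : PySem.Dict Int Int → Int → PySem.Dict Int Int :=
    fun d a => d.insert (a - pvRev a) (d.getD (a - pvRev a) 0 + 1) with hF
  -- A's enumerate fold = fold over nums = single-insert fold
  have hA : (PySem.List.enumerate nums).foldl (fun d p =>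
      let identifier := p.2 - pvRev p.2
      let d := if d.contains identifier then d else d.insert identifier 0
      d.insert identifier (d.getD identifier 0 + 1)) PySem.Dict.empty
      = nums.foldl F PySem.Dict.empty := by
    have e1 : (PySem.List.enumerate nums).foldl (fun d (p : Int × Int) =>
        let identifier := p.2 - pvRev p.2
        let d := if d.contains identifier then d else d.insert identifier 0
        d.insert identifier (d.getD identifier 0 + 1)) PySem.Dict.empty
        = nums.foldl (fun (d : PySem.Dict Int Int) a =>
        let identifier := a - pvRev a
        let d := if d.contains identifier then d else d.insert identifier 0
        d.insert identifier (d.getD identifier 0 + 1)) PySem.Dict.empty := by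
      conv_rhs => rw [← PySem.List.map_snd_enumerate nums 0]
      rw [List.foldl_map]
    exact e1.trans (foldA_eq nums PySem.Dict.empty)
  rw [hA]
  -- A's second loop = pvSum of the dict's items
  have hsum : ∀ dd : PySem.Dict Int Int,
      dd.values.foldl (fun acc count =>
        if count = 1 then acc else acc + PySem.Int.floordiv (count * (count - 1)) 2) 0
      = pvSum dd.items := by
    intro dd
    rw [PySem.List.foldl_congr_mem dd.values _ (fun acc c => acc + pvComb c) 0 (by
      intro acc c _
      by_cases h1 : c = 1
      · subst h1; simp [pvComb, PySem.Int.floordiv]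
      · simp [h1, pvComb])]
    rw [PySem.List.foldl_add]
    show 0 + (dd.items.map (·.2) |>.map pvComb).sum = pvSum dd.items
    simp [pvSum, List.map_map, Function.comp_def]
  rw [hsum]
  -- B's fold carries (the same dict, pvSum of it)
  have hB : nums.foldl (fun st a =>
      let identifier := a - pvRev a
      let c := st.1.getD identifier 0
      (st.1.insert identifier (c + 1), st.2 + c)) (PySem.Dict.empty, 0)
      = (nums.foldl F PySem.Dict.empty, pvSum (nums.foldl F PySem.Dict.empty).items) := by
    have h0 : pvSum (PySem.Dict.empty : PySem.Dict Int Int).items = 0 := by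
      simp [pvSum, PySem.Dict.empty]
    have := inv nums PySem.Dict.empty PySem.Dict.nodup_keys_empty
    rw [h0] at this
    exact this
  rw [hB]
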